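-- pv_equiv track=rewrite | github.com/eAntillon/AdventOfCode | 2024/aoc_python/day_11/solution.py | get_next_blink_status
-- ===== SOURCE A (Python) =====
-- def get_next_blink_status(stone, i, max_blinks):
--     if i == max_blinks:
--         return [stone]
--     if stone == 0:
--         result = get_next_blink_status(1, i + 1, max_blinks)
--         return result
--     elif len(str(stone)) % 2 == 0:
--         stone_str = str(stone)
--         length = len(stone_str)
--         left = int(stone_str[:length // 2])
--         right = int(stone_str[length // 2:])
--         stones = []
--         stones.extend(get_next_blink_status(left, i+1, max_blinks))
--         stones.extend(get_next_blink_status(right, i+1, max_blinks))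
--         return stones
--     else:
--         result = get_next_blink_status(stone * 2024, i+1, max_blinks)
--         return result
-- ===== SOURCE B (Python) =====
-- def get_next_blink_status(stone, i, max_blinks):
--     # Memoized: each distinct (stone, remaining-blinks) subproblem becomes one shared
--     # DAG node (leaf int, or pair of child nodes); the final list is flattened once.
--     cache = {}
--
--     def go(stone, rem):
--         if rem == 0:
--             return stone
--         key = (stone, rem)
--         if key in cache:
--             return cache[key]
--         if stone == 0:
--             res = go(1, rem - 1)
--         else:
--             s = str(stone)
--             if len(s) % 2 == 0:
--                 half = len(s) // 2
--                 res = (go(int(s[:half]), rem - 1), go(int(s[half:]), rem - 1))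
--             else:
--                 res = go(stone * 2024, rem - 1)
--         cache[key] = res
--         return res
--
--     root = go(stone, max_blinks - i)
--     out = []
--     stack = [root]
--     while stack:
--         node = stack.pop()
--         if isinstance(node, tuple):
--             stack.append(node[1])
--             stack.append(node[0])
--         else:
--             out.append(node)
--     return out
-- ===== Notes on version B (the rewrite author's own statement) =====
-- stated objective: alternative
-- what changed: B replaces A's naive exponential recursion with a memoized recursion keyed by (stone, remaining blinks) that builds shared DAG nodes (each distinct subproblem computed once) and flattens the result list once at the end; intended as faster - a timing run measured B 2.73x at the largest size both finished, unconfirmed beyond that because the output list itself grows exponentially for both.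
-- outside the precondition, e.g. on get_next_blink_status(-123, 0, 1): A returns [-1, 23], B returns [-1, 23]
import Mathlib
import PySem

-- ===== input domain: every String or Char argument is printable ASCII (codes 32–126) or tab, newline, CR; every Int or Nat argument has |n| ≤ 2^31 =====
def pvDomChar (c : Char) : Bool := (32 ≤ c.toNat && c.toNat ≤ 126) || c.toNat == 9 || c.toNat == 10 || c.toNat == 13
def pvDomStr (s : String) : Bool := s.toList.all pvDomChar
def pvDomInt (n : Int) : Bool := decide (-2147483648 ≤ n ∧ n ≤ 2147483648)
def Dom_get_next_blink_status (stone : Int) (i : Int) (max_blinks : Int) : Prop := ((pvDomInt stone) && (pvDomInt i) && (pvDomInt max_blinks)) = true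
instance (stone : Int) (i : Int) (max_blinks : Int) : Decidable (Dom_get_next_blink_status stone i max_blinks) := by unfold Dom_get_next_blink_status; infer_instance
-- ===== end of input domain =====

-- B replaces A's naive exponential recursion with a memoized recursion keyed by (stone, remaining blinks); return values proved equal on Pre_.


-- ===== PORT A =====
-- Literal port of A's recursion; fuel = (max_blinks - i).toNat makes the recursion
-- structural (on Pre_ the fuel never runs out; fuel 0 with i ≠ max_blinks is Python's
-- infinite recursion / RecursionError, excluded by Pre_).  int(slice) is
-- (PySem.Int.ofChars? …).getD 0: on Pre_ (stone ≥ 0) the slice is pure digits so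
-- ofChars? never returns none; the none case (Python's ValueError on a bare "-") is
-- excluded by Pre_.
def goA (fuel : Nat) (stone : Int) (i : Int) (max_blinks : Int) : List Int :=
  if i = max_blinks then [stone]
  else
    match fuel with
    | 0 => []
    | Nat.succ n =>
      if stone = 0 then goA n 1 (i + 1) max_blinks
      else
        let s := PySem.Int.toChars stone
        if s.length % 2 = 0 then
          let left := (PySem.Int.ofChars? (s.take (s.length / 2))).getD 0
          let right := (PySem.Int.ofChars? (s.drop (s.length / 2))).getD 0
          goA n left (i + 1) max_blinks ++ goA n right (i + 1) max_blinks
        else goA n (stone * 2024) (i + 1) max_blinks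

def get_next_blink_status (stone : Int) (i : Int) (max_blinks : Int) : List Int :=
  goA (max_blinks - i).toNat stone i max_blinks

-- ===== PORT B =====
-- Literal port of Source B: memoized recursion on (stone, rem) building shared DAG nodes
-- (cache threaded through), then an explicit-stack flattening loop.
inductive BNode where
  | leaf : Int → BNode
  | node : BNode → BNode → BNode
deriving DecidableEq, Repr

def goB (fuel : Nat) (stone : Int) (rem : Int)
    (cache : PySem.Dict (Int × Int) BNode) :
    BNode × PySem.Dict (Int × Int) BNode :=
  if rem = 0 then (BNode.leaf stone, cache)
  else
    match PySem.Dict.get? cache (stone, rem) with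
    | some v => (v, cache)
    | none =>
      match fuel with
      | 0 => (BNode.leaf stone, cache)
      | Nat.succ n =>
        let rc :=
          if stone = 0 then goB n 1 (rem - 1) cache
          else
            let s := PySem.Int.toChars stone
            if s.length % 2 = 0 then
              let l := goB n ((PySem.Int.ofChars? (s.take (s.length / 2))).getD 0) (rem - 1) cache
              let r := goB n ((PySem.Int.ofChars? (s.drop (s.length / 2))).getD 0) (rem - 1) l.2
              (BNode.node l.1 r.1, r.2)
            else goB n (stone * 2024) (rem - 1) cache
        (rc.1, PySem.Dict.insert rc.2 (stone, rem) rc.1)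

def BNode.size : BNode → Nat
  | .leaf _ => 1
  | .node a b => 1 + a.size + b.size

-- the `while stack:` flattening loop of Source B (node[1] pushed first, node[0] popped first)
def flattenLoop : List BNode → List Int → List Int
  | [], out => out
  | BNode.leaf v :: stack, out => flattenLoop stack (out ++ [v])
  | BNode.node a b :: stack, out => flattenLoop (a :: b :: stack) out
termination_by stack _ => (stack.map BNode.size).sum
decreasing_by all_goals (simp [BNode.size]; try omega)

def get_next_blink_status_alt (stone : Int) (i : Int) (max_blinks : Int) : List Int :=
  flattenLoop [(goB (max_blinks - i).toNat stone (max_blinks - i) PySem.Dict.empty).1] []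

-- ===== PRECONDITION & SPEC =====
-- Pre_ excludes (a) i > max_blinks, where A recurses forever (RecursionError), and
-- (b) negative stones with i < max_blinks: there A's sign-including digit split raises
-- ValueError whenever some recursive split isolates the '-' sign, a subset with no
-- closed form, so the whole negative region is excluded (on the part of it where A does
-- return, e.g. (-123, 0, 1) → [-1, 23], B returns the same value).
def Pre_get_next_blink_status (stone : Int) (i : Int) (max_blinks : Int) : Prop :=
  i ≤ max_blinks ∧ (0 ≤ stone ∨ i = max_blinks)
instance (stone : Int) (i : Int) (max_blinks : Int) : Decidable (Pre_get_next_blink_status stone i max_blinks) := by unfold Pre_get_next_blink_status; infer_instance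

def pvWitness_get_next_blink_status : Int × Int × Int := (17, 0, 3)

def Spec_get_next_blink_status (stone : Int) (i : Int) (max_blinks : Int) (out : List Int) : Prop := out = get_next_blink_status_alt stone i max_blinks
instance (stone : Int) (i : Int) (max_blinks : Int) (out : List Int) : Decidable (Spec_get_next_blink_status stone i max_blinks out) := by unfold Spec_get_next_blink_status; infer_instance

-- ===== CLAIM (what is proved, stated in full; the proofs are below) =====
def Claim_equal_get_next_blink_status : Prop := ∀ (stone : Int) (i : Int) (max_blinks : Int), Dom_get_next_blink_status stone i max_blinks → Pre_get_next_blink_status stone i max_blinks → Spec_get_next_blink_status stone i max_blinks (get_next_blink_status stone i max_blinks)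

-- ===== LEMMAS AND PROOFS =====

-- The common mathematical function of both programs: the stone list after `r` blinks.
def pureF : Nat → Int → List Int
  | 0, s => [s]
  | Nat.succ r, s =>
    if s = 0 then pureF r 1
    else
      let cs := PySem.Int.toChars s
      if cs.length % 2 = 0 then
        pureF r ((PySem.Int.ofChars? (cs.take (cs.length / 2))).getD 0) ++
          pureF r ((PySem.Int.ofChars? (cs.drop (cs.length / 2))).getD 0)
      else pureF r (s * 2024)

lemma goA_eq (fuel : Nat) : ∀ (stone i max_blinks : Int), i ≤ max_blinks →
    (max_blinks - i).toNat ≤ fuel → goA fuel stone i max_blinks = pureF (max_blinks - i).toNat stone := by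
  induction fuel with
  | zero =>
    intro stone i m hi hf
    have : i = m := by omega
    subst this
    simp [goA, pureF]
  | succ n ih =>
    intro stone i m hi hf
    by_cases h : i = m
    · subst h; simp [goA, pureF]
    · have hlt : i < m := lt_of_le_of_ne hi h
      have hr : (m - i).toNat = (m - (i + 1)).toNat + 1 := by omega
      have hf' : (m - (i + 1)).toNat ≤ n := by omega
      have hi' : i + 1 ≤ m := by omega
      rw [hr]
      simp only [goA, if_neg h, pureF]
      split_ifs with h0 he
      · exact ih 1 (i + 1) m hi' hf'
      · rw [ih _ (i + 1) m hi' hf', ih _ (i + 1) m hi' hf']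
      · exact ih _ (i + 1) m hi' hf'

-- Cache invariant: every stored node flattens to the true blink expansion of its key.
def BNode.toList : BNode → List Int
  | .leaf v => [v]
  | .node a b => a.toList ++ b.toList

def goodCache (cache : PySem.Dict (Int × Int) BNode) : Prop :=
  ∀ (s r : Int) (v : BNode), cache.get? (s, r) = some v → v.toList = pureF r.toNat s

lemma goB_eq (fuel : Nat) : ∀ (stone rem : Int) (cache : PySem.Dict (Int × Int) BNode),
    0 ≤ rem → rem.toNat ≤ fuel → goodCache cache →
    (goB fuel stone rem cache).1.toList = pureF rem.toNat stone ∧ goodCache (goB fuel stone rem cache).2 := by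
  induction fuel with
  | zero =>
    intro stone rem cache h0 hf hg
    have : rem = 0 := by omega
    subst this
    exact ⟨by simp [goB, pureF, BNode.toList], by simpa [goB] using hg⟩
  | succ n ih =>
    intro stone rem cache h0 hf hg
    by_cases h : rem = 0
    · subst h; exact ⟨by simp [goB, pureF, BNode.toList], by simpa [goB] using hg⟩
    · have hr : rem.toNat = (rem - 1).toNat + 1 := by omega
      have h0' : 0 ≤ rem - 1 := by omega
      have hf' : (rem - 1).toNat ≤ n := by omega
      rcases hget : PySem.Dict.get? cache (stone, rem) with _ | v
      · -- cache miss
        have key : ∀ (rc : BNode × PySem.Dict (Int × Int) BNode),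
            rc.1.toList = pureF rem.toNat stone → goodCache rc.2 →
            (rc.1, PySem.Dict.insert rc.2 (stone, rem) rc.1).1.toList = pureF rem.toNat stone ∧
            goodCache (rc.1, PySem.Dict.insert rc.2 (stone, rem) rc.1).2 := by
          intro rc hv hgc
          refine ⟨hv, ?_⟩
          intro s' r' v' hget'
          rw [PySem.Dict.get?_insert] at hget'
          split_ifs at hget' with hk
          · cases hget'
            cases hk
            exact hv
          · exact hgc _ _ _ hget'
        simp only [goB, if_neg h, hget]
        split_ifs with h0s he
        · have := ih 1 (rem - 1) cache h0' hf' hg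
          refine key _ ?_ this.2
          rw [hr]; simp only [pureF, if_pos h0s]
          exact this.1
        · set L := (PySem.Int.ofChars? ((PySem.Int.toChars stone).take ((PySem.Int.toChars stone).length / 2))).getD 0 with hL
          set R := (PySem.Int.ofChars? ((PySem.Int.toChars stone).drop ((PySem.Int.toChars stone).length / 2))).getD 0 with hR
          have hl := ih L (rem - 1) cache h0' hf' hg
          have hrr := ih R (rem - 1) (goB n L (rem - 1) cache).2 h0' hf' hl.2
          refine key (BNode.node (goB n L (rem - 1) cache).1 (goB n R (rem - 1) (goB n L (rem - 1) cache).2).1,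
              (goB n R (rem - 1) (goB n L (rem - 1) cache).2).2) ?_ hrr.2
          rw [hr]; simp only [pureF, if_neg h0s, if_pos he]
          rw [← hL, ← hR]
          simp only [BNode.toList]
          rw [hl.1, hrr.1]
        · have := ih (stone * 2024) (rem - 1) cache h0' hf' hg
          refine key _ ?_ this.2
          rw [hr]; simp only [pureF, if_neg h0s, if_neg he]
          exact this.1
      · -- cache hit
        simp only [goB, if_neg h, hget]
        exact ⟨hg _ _ _ hget, hg⟩

lemma goodCache_empty : goodCache PySem.Dict.empty := by
  intro s r v hv
  simp [PySem.Dict.get?_empty] at hv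

lemma flattenLoop_eq : ∀ (stack : List BNode) (out : List Int),
    flattenLoop stack out = out ++ (stack.map BNode.toList).flatten := by
  intro stack out
  induction stack, out using flattenLoop.induct with
  | case1 out => simp [flattenLoop]
  | case2 v stack out ih => simp [flattenLoop, BNode.toList, ih]
  | case3 a b stack out ih => simp [flattenLoop, BNode.toList, ih]

-- ===== VERDICT (by name: the statement is the Claim_ definition above) =====
theorem get_next_blink_status_spec : Claim_equal_get_next_blink_status := by
  intro stone i m _ hpre
  have h1 : i ≤ m := hpre.1
  unfold Spec_get_next_blink_status get_next_blink_status get_next_blink_status_alt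
  rw [goA_eq _ stone i m h1 le_rfl, flattenLoop_eq]
  simp [(goB_eq _ stone (m - i) PySem.Dict.empty (by omega) le_rfl goodCache_empty).1]
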